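-- pv_equiv track=rewrite | github.com/KunLiam/AcouTest | audio_test_tool.py | _split_manifest_urls
-- ===== SOURCE A (Python) =====
-- def _split_manifest_urls(value):
--     out = []
--     if isinstance(value, str):
--         parts = [x.strip() for x in value.replace(";", ",").split(",")]
--         out.extend([x for x in parts if x])
--     elif isinstance(value, (list, tuple)):
--         for x in value:
--             s = str(x or "").strip()
--             if s:
--                 out.append(s)
--     return out
-- ===== SOURCE B (Python) =====
-- def _split_manifest_urls(value):
--     # Single left-to-right scanner: split on ',' or ';' directly while
--     # collecting stripped non-empty tokens, instead of replace+split+strip passes.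
--     if isinstance(value, str):
--         out = []
--         buf = []
--         for ch in value:
--             if ch == ',' or ch == ';':
--                 s = "".join(buf).strip()
--                 if s:
--                     out.append(s)
--                 buf = []
--             else:
--                 buf.append(ch)
--         s = "".join(buf).strip()
--         if s:
--             out.append(s)
--         return out
--     if isinstance(value, (list, tuple)):
--         out = []
--         for x in value:
--             s = str(x or "").strip()
--             if s:
--                 out.append(s)
--         return out
--     return []
-- ===== Notes on version B (the rewrite author's own statement) =====
-- stated objective: alternative
-- what changed: Replaces the replace-then-split-then-strip-then-filter pipeline (several passes and intermediate lists) with one single-pass character scanner that splits on ',' or ';' directly and emits stripped non-empty tokens as it goes.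
import Mathlib
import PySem

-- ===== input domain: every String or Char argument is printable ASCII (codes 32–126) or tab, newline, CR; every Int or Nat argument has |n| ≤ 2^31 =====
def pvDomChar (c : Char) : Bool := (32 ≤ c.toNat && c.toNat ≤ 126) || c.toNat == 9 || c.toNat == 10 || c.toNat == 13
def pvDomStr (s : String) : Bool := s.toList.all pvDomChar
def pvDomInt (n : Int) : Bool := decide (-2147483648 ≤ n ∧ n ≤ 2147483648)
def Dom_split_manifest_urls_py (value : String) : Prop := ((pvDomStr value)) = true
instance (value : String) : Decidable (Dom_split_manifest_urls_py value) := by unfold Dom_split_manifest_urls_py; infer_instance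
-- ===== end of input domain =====

-- B replaces A's replace-then-split-then-strip-then-filter pipeline by a single
-- left-to-right character scanner splitting on ',' or ';' directly (objective: alternative).
-- The Lean signature covers the str branch of both Python functions (value : String).

-- ===== PORT A =====
def split_manifest_urls_py (value : String) : List String :=
  let out : List String := []
  -- value.replace(";", ",").split(","): the separator "," is non-empty, so split? is
  -- always `some` here; `.getD []` only totalizes it.
  let parts := ((PySem.Str.split? (PySem.Str.replace value ";" ",") ",").getD []).map PySem.Str.strip
  out ++ parts.filter (fun x => x ≠ "")

-- ===== PORT B =====
-- flush of B's loop: '"".join(buf).strip()' appended if non-empty ("if s: out.append(s)")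
def pvFlush (out : List String) (buf : List Char) : List String :=
  let s := String.ofList (PySem.Chars.strip buf)
  if s ≠ "" then out ++ [s] else out

-- one iteration of B's for-loop over the characters of `value`
def pvStep (st : List String × List Char) (ch : Char) : List String × List Char :=
  if ch = ',' ∨ ch = ';' then (pvFlush st.1 st.2, []) else (st.1, st.2 ++ [ch])

def split_manifest_urls_py_alt (value : String) : List String :=
  let st := value.toList.foldl pvStep ([], [])
  pvFlush st.1 st.2

-- ===== PRECONDITION & SPEC =====
def Spec_split_manifest_urls_py (value : String) (out : List String) : Prop := out = split_manifest_urls_py_alt value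
instance (value : String) (out : List String) : Decidable (Spec_split_manifest_urls_py value out) := by unfold Spec_split_manifest_urls_py; infer_instance

-- ===== CLAIM (what is proved, stated in full; the proofs are below) =====
def Claim_equal_split_manifest_urls_py : Prop := ∀ (value : String), Dom_split_manifest_urls_py value → Spec_split_manifest_urls_py value (split_manifest_urls_py value)

-- ===== LEMMAS AND PROOFS =====

-- proof-only helpers: direct recursive descriptions of the two splitting processes
def pvRepl (c : Char) : Char := if c = ';' then ',' else c

def pvSplitC : List Char → List Char → List (List Char)
  | [], buf => [buf]
  | c :: t, buf => if c = ',' then buf :: pvSplitC t [] else pvSplitC t (buf ++ [c])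

def pvSplitCS : List Char → List Char → List (List Char)
  | [], buf => [buf]
  | c :: t, buf => if c = ',' ∨ c = ';' then buf :: pvSplitCS t [] else pvSplitCS t (buf ++ [c])

lemma pv_replace_go (cs : List Char) : ∀ (fuel : Nat) (acc : List Char), cs.length ≤ fuel →
    PySem.Chars.replace.go [';'] [','] fuel cs acc = acc.reverse ++ cs.map pvRepl := by
  induction cs with
  | nil =>
    intro fuel acc _
    cases fuel <;> simp [PySem.Chars.replace.go]
  | cons c t ih =>
    intro fuel acc h
    cases fuel with
    | zero => simp at h
    | succ f =>
      simp only [PySem.Chars.replace.go, List.isPrefixOf]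
      by_cases hc : c = ';'
      · subst hc
        simp only [beq_self_eq_true, Bool.and_self, List.length_cons,
          List.length_nil, List.drop_succ_cons, List.drop_zero, List.reverse_cons]
        have ht : t.length ≤ f := by simp at h; omega
        rw [ih f _ ht]
        simp [pvRepl]
      · have hbeq : (';' == c) = false := by simp [beq_eq_false_iff_ne]; exact fun e => hc e.symm
        simp only [hbeq, Bool.false_and, Bool.false_eq_true, if_false]
        rw [ih f _ (by simpa using Nat.succ_le_succ_iff.mp h)]
        simp [pvRepl, hc]

lemma pv_replace_eq (cs : List Char) :
    PySem.Chars.replace cs [';'] [','] = cs.map pvRepl := by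
  have := pv_replace_go cs cs.length [] le_rfl
  simpa [PySem.Chars.replace] using this

lemma pv_splitOn_go (cs : List Char) : ∀ (fuel : Nat) (cur : List Char) (acc : List (List Char)),
    cs.length < fuel →
    PySem.Chars.splitOn.go [','] fuel cs cur acc = acc.reverse ++ pvSplitC cs cur.reverse := by
  induction cs with
  | nil =>
    intro fuel cur acc h
    cases fuel with
    | zero => omega
    | succ f => simp [PySem.Chars.splitOn.go, pvSplitC]
  | cons c t ih =>
    intro fuel cur acc h
    cases fuel with
    | zero => omega
    | succ f =>
      simp only [PySem.Chars.splitOn.go, List.isPrefixOf]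
      by_cases hc : c = ','
      · subst hc
        simp only [beq_self_eq_true, Bool.and_self, List.length_cons,
          List.length_nil, List.drop_succ_cons, List.drop_zero]
        have ht : t.length < f := by simp at h; omega
        rw [ih f [] _ ht]
        simp [pvSplitC]
      · have hbeq : (',' == c) = false := by simp [beq_eq_false_iff_ne]; exact fun e => hc e.symm
        simp only [hbeq, Bool.false_and, Bool.false_eq_true, if_false]
        rw [ih f (c :: cur) acc (by simpa using Nat.succ_lt_succ_iff.mp h)]
        simp [pvSplitC, hc]

lemma pv_splitOn_eq (cs : List Char) :
    PySem.Chars.splitOn cs [','] = pvSplitC cs [] := by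
  have := pv_splitOn_go cs (cs.length + 1) [] [] (Nat.lt_succ_self _)
  simpa [PySem.Chars.splitOn] using this

lemma pv_split_map (cs : List Char) : ∀ (b : List Char),
    pvSplitC (cs.map pvRepl) b = pvSplitCS cs b := by
  induction cs with
  | nil => intro b; simp [pvSplitC, pvSplitCS]
  | cons c t ih =>
    intro b
    by_cases h1 : c = ';'
    · subst h1; simp [pvSplitC, pvSplitCS, pvRepl, ih]
    · by_cases h2 : c = ','
      · subst h2; simp [pvSplitC, pvSplitCS, pvRepl, ih]
      · simp [pvSplitC, pvSplitCS, pvRepl, h1, h2, ih]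

lemma pv_foldl (cs : List Char) : ∀ (out : List String) (buf : List Char),
    pvFlush ((cs.foldl pvStep (out, buf)).1) ((cs.foldl pvStep (out, buf)).2)
      = out ++ ((pvSplitCS cs buf).map (fun t => String.ofList (PySem.Chars.strip t))).filter
          (fun s => s ≠ "") := by
  induction cs with
  | nil =>
    intro out buf
    by_cases h : String.ofList (PySem.Chars.strip buf) = "" <;>
      simp [pvFlush, pvSplitCS, h]
  | cons c t ih =>
    intro out buf
    by_cases hc : c = ',' ∨ c = ';'
    · have hstep : pvStep (out, buf) c = (pvFlush out buf, []) := by simp [pvStep, hc]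
      rw [List.foldl_cons, hstep, ih]
      by_cases h : String.ofList (PySem.Chars.strip buf) = ""
      · simp [pvFlush, pvSplitCS, hc, h]
      · simp [pvFlush, pvSplitCS, hc, h, List.append_assoc]
    · have hstep : pvStep (out, buf) c = (out, buf ++ [c]) := by simp [pvStep, hc]
      rw [List.foldl_cons, hstep, ih]
      simp [pvSplitCS, hc]

lemma pv_strip_ofList (t : List Char) :
    PySem.Str.strip (String.ofList t) = String.ofList (PySem.Chars.strip t) := by
  simp [PySem.Str.strip]

lemma pv_main (value : String) :
    split_manifest_urls_py value = split_manifest_urls_py_alt value := by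
  have hrep : (PySem.Str.replace value ";" ",").toList = value.toList.map pvRepl := by
    rw [PySem.Str.toList_replace]
    have h1 : (";" : String).toList = [';'] := rfl
    have h2 : ("," : String).toList = [','] := rfl
    rw [h1, h2, pv_replace_eq]
  have hsplit : (PySem.Str.split? (PySem.Str.replace value ";" ",") ",").getD []
      = (pvSplitCS value.toList []).map String.ofList := by
    have h2 : ("," : String).toList = [','] := rfl
    simp only [PySem.Str.split?, PySem.Chars.split?, h2, hrep]
    simp [pv_splitOn_eq, pv_split_map]
  simp only [split_manifest_urls_py, split_manifest_urls_py_alt, hsplit]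
  rw [pv_foldl value.toList [] []]
  simp [List.map_map, Function.comp_def, pv_strip_ofList]

-- ===== VERDICT (by name: the statement is the Claim_ definition above) =====
theorem split_manifest_urls_py_spec : Claim_equal_split_manifest_urls_py := by
  intro value _
  exact pv_main value
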